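-- pv_equiv track=rewrite | github.com/deysantanu84/python-portfolio | problemSolving/queues/sumOfMinAndMax.py | solve
-- ===== SOURCE A (Python) =====
-- def solve(A, B):
--     result = 0
--     N = len(A)
--     increasingQueue = []
--     decreasingQueue = []
--
--     for i in range(B):
--         while len(increasingQueue) and A[increasingQueue[-1]] >= A[i]:
--             increasingQueue.pop()
--
--         while len(decreasingQueue) and A[decreasingQueue[-1]] <= A[i]:
--             decreasingQueue.pop()
--
--         decreasingQueue.append(i)
--         increasingQueue.append(i)
--
--     for i in range(B, N):
--         result = (result % (10**9 + 7) + A[increasingQueue[0]] + A[decreasingQueue[0]]) % (10**9 + 7)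
--
--         while len(increasingQueue) and increasingQueue[0] <= i - B:
--             increasingQueue.pop(0)
--
--         while len(decreasingQueue) and decreasingQueue[0] <= i - B:
--             decreasingQueue.pop(0)
--
--         while len(increasingQueue) and A[increasingQueue[-1]] >= A[i]:
--             increasingQueue.pop()
--
--         while len(decreasingQueue) and A[decreasingQueue[-1]] <= A[i]:
--             decreasingQueue.pop()
--
--         decreasingQueue.append(i)
--         increasingQueue.append(i)
--
--     result = result % (10**9 + 7) + A[increasingQueue[0]] + A[decreasingQueue[0]] % (10**9 + 7)
--
--     return result % (10**9 + 7)
-- ===== SOURCE B (Python) =====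
-- def solve(A, B):
--     # Different algorithm from the queue version: prime min/max on the first
--     # window with a direct index scan, then take builtin min/max of each later
--     # window slice; a single mod at the end gives the same value because A's
--     # intermediate mods preserve congruence mod 1e9+7.
--     M = 10 ** 9 + 7
--     N = len(A)
--     mn = mx = A[0]
--     for i in range(1, B):
--         v = A[i]
--         mn = min(mn, v)
--         mx = max(mx, v)
--     total = mn + mx
--     for e in range(B, N):
--         w = A[e - B + 1 : e + 1]
--         total += min(w) + max(w)
--     return total % M
-- ===== Notes on version B (the rewrite author's own statement) =====
-- stated objective: simpler
-- what changed: Replaced the two monotonic index queues and their four pop-while loops by a direct scan: min/max of the first window by one index pass, then builtin min/max of each later window slice, with a single mod at the end (same value since A's intermediate mods preserve congruence).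
import Mathlib
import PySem

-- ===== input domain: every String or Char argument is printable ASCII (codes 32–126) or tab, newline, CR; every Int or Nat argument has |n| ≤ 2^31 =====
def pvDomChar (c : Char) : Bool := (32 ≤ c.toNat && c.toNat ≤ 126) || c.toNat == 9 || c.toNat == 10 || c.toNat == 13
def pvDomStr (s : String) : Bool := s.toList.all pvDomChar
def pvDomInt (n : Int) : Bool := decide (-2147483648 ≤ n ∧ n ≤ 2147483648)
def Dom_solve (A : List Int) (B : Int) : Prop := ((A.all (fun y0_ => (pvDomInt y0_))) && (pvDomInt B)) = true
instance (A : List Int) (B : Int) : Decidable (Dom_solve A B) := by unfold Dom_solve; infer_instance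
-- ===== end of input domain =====

-- B replaces A's two monotonic index queues by a direct scan (objective: simpler,
-- at a higher asymptotic cost): one index pass over the first window, then builtin
-- min/max of each later window slice; equal results because A's intermediate mods
-- preserve congruence mod 1e9+7.


-- ===== PORT A =====
-- 'while len(q) and p(q[-1]): q.pop()' — removes the maximal suffix whose
-- elements satisfy p, exactly what the Python while/pop-from-the-end loop does.
def popBack {α : Type} (p : α → Bool) : List α → List α
  | [] => []
  | x :: xs =>
    match popBack p xs with
    | [] => if p x then [] else [x]
    | y :: ys => x :: y :: ys

-- queue[0] / A[idx] accesses: under Pre_solve every queue is nonempty when read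
-- and every stored index is in range, so headD 0 / pyGetD … 0 never take the default.
def solve (A : List Int) (B : Int) : Int :=
  let M : Int := 10 ^ 9 + 7
  let N : Int := (A.length : Int)
  let qs := (PySem.List.pyRange 0 B 1).foldl (fun (qs : List Int × List Int) i =>
    let ai := PySem.List.pyGetD A i 0
    let inc := popBack (fun j => decide (PySem.List.pyGetD A j 0 ≥ ai)) qs.1
    let dec := popBack (fun j => decide (PySem.List.pyGetD A j 0 ≤ ai)) qs.2
    (inc ++ [i], dec ++ [i])) ([], [])
  let st := (PySem.List.pyRange B N 1).foldl (fun (st : Int × List Int × List Int) i =>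
    let ai := PySem.List.pyGetD A i 0
    let r := PySem.Int.mod (PySem.Int.mod st.1 M + PySem.List.pyGetD A (st.2.1.headD 0) 0
               + PySem.List.pyGetD A (st.2.2.headD 0) 0) M
    -- 'while len(q) and q[0] <= i - B: q.pop(0)' — drops the prefix of too-old indices
    let inc0 := st.2.1.dropWhile (fun j => decide (j ≤ i - B))
    let dec0 := st.2.2.dropWhile (fun j => decide (j ≤ i - B))
    let inc := popBack (fun j => decide (PySem.List.pyGetD A j 0 ≥ ai)) inc0
    let dec := popBack (fun j => decide (PySem.List.pyGetD A j 0 ≤ ai)) dec0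
    (r, inc ++ [i], dec ++ [i])) (0, qs.1, qs.2)
  let result := PySem.Int.mod st.1 M + PySem.List.pyGetD A (st.2.1.headD 0) 0
      + PySem.Int.mod (PySem.List.pyGetD A (st.2.2.headD 0) 0) M
  PySem.Int.mod result M

-- ===== PORT B =====
-- A[0]/A[i] accesses and min(w)/max(w) raise only outside Pre_solve (empty
-- first window / too-short list), so pyGetD … 0 / .getD 0 never take the default.
def solve_alt (A : List Int) (B : Int) : Int :=
  let M : Int := 10 ^ 9 + 7
  let N : Int := (A.length : Int)
  let p := (PySem.List.pyRange 1 B 1).foldl (fun (p : Int × Int) i =>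
    let v := PySem.List.pyGetD A i 0
    (min p.1 v, max p.2 v)) (PySem.List.pyGetD A 0 0, PySem.List.pyGetD A 0 0)
  let total := (PySem.List.pyRange B N 1).foldl (fun t e =>
    let w := PySem.List.slice A (some (e - B + 1)) (some (e + 1))
    t + ((PySem.List.min? w (fun x => x)).getD 0 + (PySem.List.max? w (fun x => x)).getD 0))
    (p.1 + p.2)
  PySem.Int.mod total M

-- ===== PRECONDITION & SPEC =====
-- exactly the inputs where A returns: otherwise A hits IndexError (A[i] with
-- i ≥ len(A) in the first loop, or queue[0] on an empty queue when B ≤ 0)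
def Pre_solve (A : List Int) (B : Int) : Prop := 1 ≤ B ∧ B ≤ (A.length : Int)
instance (A : List Int) (B : Int) : Decidable (Pre_solve A B) := by unfold Pre_solve; infer_instance
def pvWitness_solve : List Int × Int := ([1, 2], 1)

def Spec_solve (A : List Int) (B : Int) (out : Int) : Prop := out = solve_alt A B
instance (A : List Int) (B : Int) (out : Int) : Decidable (Spec_solve A B out) := by unfold Spec_solve; infer_instance

-- ===== CLAIM (what is proved, stated in full; the proofs are below) =====
def Claim_equal_solve : Prop := ∀ (A : List Int) (B : Int), Dom_solve A B → Pre_solve A B → Spec_solve A B (solve A B)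


-- ===== LEMMAS AND PROOFS =====

-- abbreviations used throughout the proofs
def pvA (A : List Int) : Nat → Int := fun j => A.getD j 0
def pvLt : Int → Int → Bool := fun x y => decide (x < y)
def pvGt : Int → Int → Bool := fun x y => decide (y < x)

-- pvKeep c a i j: index j survives against every later index up to i
def pvKeep (c : Int → Int → Bool) (a : Nat → Int) (i j : Nat) : Bool :=
  (List.range' (j+1) (i - j)).all (fun k => c (a j) (a k))

def pvWin (lo i : Nat) : List Nat := List.range' lo (i + 1 - lo)

-- canonical form of a monotonic queue covering window [lo, i]
def pvQ (c : Int → Int → Bool) (a : Nat → Int) (lo i : Nat) : List Nat :=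
  (pvWin lo i).filter (pvKeep c a i)

theorem popBack_eq_filter {α : Type} (p : α → Bool) (l : List α)
    (h : l.Pairwise (fun x y => p x = true → p y = true)) :
    popBack p l = l.filter (fun x => !p x) := by
  induction l with
  | nil => rfl
  | cons x xs ih =>
    rcases List.pairwise_cons.mp h with ⟨h1, h2⟩
    have ihx := ih h2
    cases hf : popBack p xs with
    | nil =>
      have hfe : xs.filter (fun x => !p x) = [] := by rw [← ihx, hf]
      by_cases hp : p x = true
      · simp [popBack, hf, hp, hfe]
      · simp [popBack, hf, hp, hfe]
    | cons y ys =>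
      have hfe : xs.filter (fun x => !p x) = y :: ys := by rw [← ihx, hf]
      have hyf : y ∈ xs.filter (fun x => !p x) := by rw [hfe]; exact List.mem_cons_self ..
      have hy : y ∈ xs := (List.mem_filter.mp hyf).1
      have hpy : (!p y) = true := (List.mem_filter.mp hyf).2
      have hpx : ¬ p x = true := fun hx => by simp [h1 y hy hx] at hpy
      simp [popBack, hf, hpx, hfe]

theorem dropWhile_eq_filter {α : Type} (p : α → Bool) (l : List α)
    (h : l.Pairwise (fun x y => p y = true → p x = true)) :
    l.dropWhile p = l.filter (fun x => !p x) := by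
  induction l with
  | nil => rfl
  | cons x xs ih =>
    rcases List.pairwise_cons.mp h with ⟨h1, h2⟩
    by_cases hp : p x = true
    · rw [List.dropWhile_cons_of_pos hp, ih h2, List.filter_cons]
      simp [hp]
    · have : ∀ y ∈ xs, (!p y) = true := fun y hy => by
        by_contra hc
        exact hp (h1 y hy (by simpa using hc))
      rw [List.dropWhile_cons_of_neg hp, List.filter_cons]
      have hx : (!p x) = true := by simpa using hp
      rw [if_pos hx, List.filter_eq_self.mpr this]

theorem popBack_map {α β : Type} (p : β → Bool) (f : α → β) (l : List α) :
    popBack p (l.map f) = (popBack (fun x => p (f x)) l).map f := by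
  induction l with
  | nil => rfl
  | cons x xs ih =>
    simp only [List.map_cons, popBack, ih]
    cases hf : popBack (fun x => p (f x)) xs with
    | nil => by_cases hp : p (f x) = true <;> simp [hp]
    | cons y ys => simp

theorem pvQ_pairwise_lt (c : Int → Int → Bool) (a : Nat → Int) (lo i : Nat) :
    (pvQ c a lo i).Pairwise (· < ·) :=
  (List.pairwise_lt_range' ..).filter _

theorem mem_pvWin {lo i k : Nat} : k ∈ pvWin lo i ↔ lo ≤ k ∧ k ≤ i := by
  unfold pvWin
  rw [List.mem_range'_1]
  omega

theorem pvKeep_self (c : Int → Int → Bool) (a : Nat → Int) (i : Nat) :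
    pvKeep c a i i = true := by
  simp [pvKeep]

theorem pvKeep_elim {c : Int → Int → Bool} {a : Nat → Int} {i j : Nat}
    (h : pvKeep c a i j = true) {k : Nat} (h1 : j < k) (h2 : k ≤ i) :
    c (a j) (a k) = true := by
  unfold pvKeep at h
  rw [List.all_eq_true] at h
  exact h k (by rw [List.mem_range'_1]; omega)

-- the step "pop from the back while the last index loses against i+1, push i+1"
theorem pvQ_step (c : Int → Int → Bool)
    (htrans : ∀ x y z, c x y = true → c y z = true → c x z = true)
    (a : Nat → Int) (lo i : Nat) (hlo : lo ≤ i + 1) :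
    popBack (fun j => !c (a j) (a (i+1))) (pvQ c a lo i) ++ [i+1] = pvQ c a lo (i+1) := by
  have hpw : (pvQ c a lo i).Pairwise
      (fun x y => (!c (a x) (a (i+1))) = true → (!c (a y) (a (i+1))) = true) := by
    have := pvQ_pairwise_lt c a lo i
    refine this.imp_of_mem ?_
    intro x y hx hy hxy hpx
    have hxw := List.mem_of_mem_filter hx
    have hyw := List.mem_of_mem_filter hy
    have hkx : pvKeep c a i x = true := List.of_mem_filter hx
    have hxy' : c (a x) (a y) = true :=
      pvKeep_elim hkx hxy (mem_pvWin.mp hyw).2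
    simp only [Bool.not_eq_true'] at hpx ⊢
    by_contra hc
    simp only [Bool.not_eq_false] at hc
    rw [htrans _ _ _ hxy' hc] at hpx
    exact absurd hpx (by simp)
  rw [popBack_eq_filter _ _ hpw]
  unfold pvQ
  rw [List.filter_filter]
  have hwin : pvWin lo (i+1) = pvWin lo i ++ [i+1] := by
    unfold pvWin
    have h1 : i + 1 + 1 - lo = (i + 1 - lo) + 1 := by omega
    rw [h1, List.range'_concat]
    congr 2
    omega
  rw [hwin, List.filter_append]
  have hlast : List.filter (pvKeep c a (i+1)) [i+1] = [i+1] := by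
    simp [pvKeep_self]
  rw [hlast]
  congr 1
  apply List.filter_congr
  intro j hj
  have hji : j ≤ i := (mem_pvWin.mp hj).2
  unfold pvKeep
  have hr : List.range' (j+1) (i+1-j) = List.range' (j+1) (i-j) ++ [i+1] := by
    have h1 : i + 1 - j = (i - j) + 1 := by omega
    rw [h1, List.range'_concat]
    congr 2
    omega
  rw [hr, List.all_append]
  simp [Bool.and_comm]

-- the trim "drop from the front while the index has left the window"
theorem pvQ_trim (c : Int → Int → Bool) (a : Nat → Int) (lo lo' i : Nat)
    (h1 : lo ≤ lo') (h2 : lo' ≤ i + 1) :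
    (pvQ c a lo i).dropWhile (fun j => decide (j < lo')) = pvQ c a lo' i := by
  have hpw : (pvQ c a lo i).Pairwise
      (fun x y => decide (y < lo') = true → decide (x < lo') = true) := by
    refine (pvQ_pairwise_lt c a lo i).imp ?_
    intro x y hxy hy
    simp only [decide_eq_true_eq] at *
    omega
  rw [dropWhile_eq_filter _ _ hpw]
  unfold pvQ
  rw [List.filter_filter]
  have hwin : pvWin lo i = List.range' lo (lo' - lo) ++ pvWin lo' i := by
    unfold pvWin
    have h3 : i + 1 - lo = (lo' - lo) + (i + 1 - lo') := by omega
    rw [h3, ← List.range'_append]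
    congr 2
    omega
  rw [hwin, List.filter_append]
  have hfirst : List.filter (fun j => (!decide (j < lo')) && pvKeep c a i j)
      (List.range' lo (lo' - lo)) = [] := by
    rw [List.filter_eq_nil_iff]
    intro j hj
    rw [List.mem_range'_1] at hj
    simp only [Bool.and_eq_true, Bool.not_eq_true', decide_eq_false_iff_not, not_lt]
    intro h
    omega
  rw [hfirst, List.nil_append]
  apply List.filter_congr
  intro j hj
  have hj' := mem_pvWin.mp hj
  have hd : decide (j < lo') = false := by
    simp only [decide_eq_false_iff_not, not_lt]
    omega
  rw [hd]
  simp

theorem pvQ_ne_nil (c : Int → Int → Bool) (a : Nat → Int) {lo i : Nat} (hlo : lo ≤ i) :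
    pvQ c a lo i ≠ [] := by
  have : i ∈ pvQ c a lo i :=
    List.mem_filter.mpr ⟨mem_pvWin.mpr ⟨hlo, le_refl i⟩, pvKeep_self c a i⟩
  exact List.ne_nil_of_mem this

theorem pvQ_head_mem (c : Int → Int → Bool) (a : Nat → Int) {lo i : Nat} (hlo : lo ≤ i) :
    (pvQ c a lo i).headD 0 ∈ pvQ c a lo i := by
  cases h : pvQ c a lo i with
  | nil => exact absurd h (pvQ_ne_nil c a hlo)
  | cons x t => simp

-- every window index strictly before the head of the filtered queue was filtered out
theorem head_filter_lt (l : List Nat) (p : Nat → Bool) (hs : l.Pairwise (· < ·))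
    (hne : l.filter p ≠ []) :
    ∀ k ∈ l, k < (l.filter p).headD 0 → p k = false := by
  induction l with
  | nil => simp
  | cons x xs ih =>
    rcases List.pairwise_cons.mp hs with ⟨h1, h2⟩
    intro k hk hklt
    by_cases hp : p x = true
    · rw [List.filter_cons_of_pos hp] at hklt
      simp only [List.headD_cons] at hklt
      rcases List.mem_cons.mp hk with rfl | hk'
      · omega
      · exact absurd (h1 k hk') (by omega)
    · rw [List.filter_cons_of_neg hp] at hklt hne
      rcases List.mem_cons.mp hk with rfl | hk'
      · simpa using hp
      · exact ih h2 hne k hk' hklt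

-- the head of the queue carries the extremal value of the whole window
theorem pvQ_head_min (c : Int → Int → Bool)
    (hirr : ∀ x, c x x = false)
    (hasym : ∀ x y, c x y = true → c y x = false)
    (htrans : ∀ x y z, c x y = true → c y z = true → c x z = true)
    (hntrans : ∀ x y z, c x y = false → c y z = false → c x z = false)
    (a : Nat → Int) {lo i : Nat} (hlo : lo ≤ i) :
    ∀ k ∈ pvWin lo i, c (a k) (a ((pvQ c a lo i).headD 0)) = false := by
  set h := (pvQ c a lo i).headD 0 with hh
  have hhm := pvQ_head_mem c a (lo := lo) (i := i) hlo
  have hhw : h ∈ pvWin lo i := List.mem_of_mem_filter hhm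
  have hhk : pvKeep c a i h = true := List.of_mem_filter hhm
  have hbelow : ∀ d k, k ∈ pvWin lo i → k < h → h - k ≤ d → c (a k) (a h) = false := by
    intro d
    induction d with
    | zero => intro k _ h1 h2; omega
    | succ d ihd =>
      intro k hkw hkh _
      have hpk : pvKeep c a i k = false :=
        head_filter_lt (pvWin lo i) (pvKeep c a i)
          (List.pairwise_lt_range' ..) (pvQ_ne_nil c a hlo) k hkw hkh
      have : ∃ m ∈ List.range' (k+1) (i-k), ¬ c (a k) (a m) = true := by
        by_contra hc
        push Not at hc
        have : pvKeep c a i k = true := by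
          unfold pvKeep
          rw [List.all_eq_true]
          exact fun m hm => hc m hm
        rw [this] at hpk
        exact absurd hpk (by simp)
      rcases this with ⟨m, hm, hcm⟩
      rw [List.mem_range'_1] at hm
      have hcm' : c (a k) (a m) = false := by simpa using hcm
      rcases lt_trichotomy m h with hmh | rfl | hhm'
      · have hmw : m ∈ pvWin lo i := mem_pvWin.mpr ⟨by have := (mem_pvWin.mp hkw).1; omega, by omega⟩
        have := ihd m hmw hmh (by omega)
        exact hntrans _ _ _ hcm' this
      · exact hcm'
      · have hch : c (a h) (a m) = true := pvKeep_elim hhk hhm' (by omega)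
        by_contra hc
        simp only [Bool.not_eq_false] at hc
        have := htrans _ _ _ hc hch
        rw [this] at hcm'
        exact absurd hcm' (by simp)
  intro k hkw
  rcases lt_trichotomy k h with hkh | rfl | hhk'
  · exact hbelow h k hkw hkh (by omega)
  · exact hirr _
  · exact hasym _ _ (pvKeep_elim hhk hhk' (mem_pvWin.mp hkw).2)

-- the window of values as a drop/take slice
theorem win_map_getD (A : List Int) (lo e : Nat) (he : e < A.length) (hlo : lo ≤ e) :
    (pvWin lo e).map (pvA A) = (A.drop lo).take (e + 1 - lo) := by
  apply List.ext_getElem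
  · simp [pvWin]
    omega
  · intro t h1 h2
    have ht : t < e + 1 - lo := by simpa [pvWin] using h1
    simp only [pvWin, List.getElem_map, List.getElem_range', pvA]
    rw [List.getElem_take, List.getElem_drop, List.getD_eq_getElem _ _ (by omega)]
    congr 1
    omega

theorem min_match (A : List Int) (lo e : Nat) (hlo : lo ≤ e) (he : e < A.length) :
    (PySem.List.min? ((A.drop lo).take (e + 1 - lo)) (fun x => x)).getD 0
      = pvA A ((pvQ pvLt (pvA A) lo e).headD 0) := by
  set w := (A.drop lo).take (e + 1 - lo) with hw
  have hwmap : (pvWin lo e).map (pvA A) = w := win_map_getD A lo e he hlo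
  have hhw : (pvQ pvLt (pvA A) lo e).headD 0 ∈ pvWin lo e :=
    List.mem_of_mem_filter (pvQ_head_mem _ _ hlo)
  have hmem : pvA A ((pvQ pvLt (pvA A) lo e).headD 0) ∈ w := by
    rw [← hwmap]; exact List.mem_map_of_mem hhw
  have hne : w ≠ [] := List.ne_nil_of_mem hmem
  cases hmn : PySem.List.min? w (fun x => x) with
  | none => exact absurd ((PySem.List.min?_eq_none_iff _ _).mp hmn) hne
  | some v =>
    have hvm : v ∈ w := PySem.List.min?_mem hmn
    have hvle : ∀ y ∈ w, v ≤ y := fun y hy => PySem.List.min?_id_le hmn y hy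
    have hhle : ∀ y ∈ w, pvA A ((pvQ pvLt (pvA A) lo e).headD 0) ≤ y := by
      intro y hy
      rw [← hwmap] at hy
      rcases List.mem_map.mp hy with ⟨k, hk, rfl⟩
      have := pvQ_head_min pvLt (by simp [pvLt]) (fun x y h => by simp [pvLt] at *; omega)
        (fun x y z h1 h2 => by simp [pvLt] at *; omega)
        (fun x y z h1 h2 => by simp [pvLt] at *; omega) (pvA A) hlo k hk
      simp only [pvLt, decide_eq_false_iff_not, not_lt] at this
      exact this
    simp only [Option.getD_some]
    exact le_antisymm (hvle _ hmem) (hhle _ hvm)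

theorem max_match (A : List Int) (lo e : Nat) (hlo : lo ≤ e) (he : e < A.length) :
    (PySem.List.max? ((A.drop lo).take (e + 1 - lo)) (fun x => x)).getD 0
      = pvA A ((pvQ pvGt (pvA A) lo e).headD 0) := by
  set w := (A.drop lo).take (e + 1 - lo) with hw
  have hwmap : (pvWin lo e).map (pvA A) = w := win_map_getD A lo e he hlo
  have hhw : (pvQ pvGt (pvA A) lo e).headD 0 ∈ pvWin lo e :=
    List.mem_of_mem_filter (pvQ_head_mem _ _ hlo)
  have hmem : pvA A ((pvQ pvGt (pvA A) lo e).headD 0) ∈ w := by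
    rw [← hwmap]; exact List.mem_map_of_mem hhw
  have hne : w ≠ [] := List.ne_nil_of_mem hmem
  cases hmn : PySem.List.max? w (fun x => x) with
  | none => exact absurd ((PySem.List.max?_eq_none_iff _ _).mp hmn) hne
  | some v =>
    have hvm : v ∈ w := PySem.List.max?_mem hmn
    have hvle : ∀ y ∈ w, y ≤ v := fun y hy => PySem.List.max?_id_le hmn y hy
    have hhle : ∀ y ∈ w, y ≤ pvA A ((pvQ pvGt (pvA A) lo e).headD 0) := by
      intro y hy
      rw [← hwmap] at hy
      rcases List.mem_map.mp hy with ⟨k, hk, rfl⟩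
      have := pvQ_head_min pvGt (by simp [pvGt]) (fun x y h => by simp [pvGt] at *; omega)
        (fun x y z h1 h2 => by simp [pvGt] at *; omega)
        (fun x y z h1 h2 => by simp [pvGt] at *; omega) (pvA A) hlo k hk
      simp only [pvGt, decide_eq_false_iff_not, not_lt] at this
      exact this
    simp only [Option.getD_some]
    exact le_antisymm (hhle _ hvm) (hvle _ hmem)

-- window extrema as used by the invariants
def pvMn (A : List Int) (b e : Nat) : Int := pvA A ((pvQ pvLt (pvA A) (e+1-b) e).headD 0)
def pvMx (A : List Int) (b e : Nat) : Int := pvA A ((pvQ pvGt (pvA A) (e+1-b) e).headD 0)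
def pvS (A : List Int) (b m : Nat) : Int :=
  ((List.range' (b-1) m).map (fun e => pvMn A b e + pvMx A b e)).sum

theorem headD_map_cast (l : List Nat) :
    (l.map (fun (j : Nat) => (j:Int))).headD 0 = ((l.headD 0 : Nat) : Int) := by
  cases l <;> simp

theorem pvLt_facts : (∀ x : Int, pvLt x x = false) ∧ (∀ x y : Int, pvLt x y = true → pvLt y x = false)
    ∧ (∀ x y z : Int, pvLt x y = true → pvLt y z = true → pvLt x z = true)
    ∧ (∀ x y z : Int, pvLt x y = false → pvLt y z = false → pvLt x z = false) := by
  refine ⟨?_, ?_, ?_, ?_⟩ <;> intros <;> simp_all [pvLt] <;> omega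

theorem pvGt_facts : (∀ x : Int, pvGt x x = false) ∧ (∀ x y : Int, pvGt x y = true → pvGt y x = false)
    ∧ (∀ x y z : Int, pvGt x y = true → pvGt y z = true → pvGt x z = true)
    ∧ (∀ x y z : Int, pvGt x y = false → pvGt y z = false → pvGt x z = false) := by
  refine ⟨?_, ?_, ?_, ?_⟩ <;> intros <;> simp_all [pvGt] <;> omega

-- one pop-and-push step of the increasing queue, on the Int-valued queue of the port
theorem step_inc (A : List Int) (lo i : Nat) (hlo : lo ≤ i) (hi : 1 ≤ i) :
    popBack (fun j => decide (PySem.List.pyGetD A j 0 ≥ PySem.List.pyGetD A (i:Int) 0))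
        ((pvQ pvLt (pvA A) lo (i-1)).map (fun (j : Nat) => (j:Int))) ++ [((i:Nat):Int)] =
    (pvQ pvLt (pvA A) lo i).map (fun (j : Nat) => (j:Int)) := by
  rw [popBack_map]
  have hp : (fun j : Nat => decide (PySem.List.pyGetD A ((j : Nat) : Int) 0 ≥ PySem.List.pyGetD A (i:Int) 0))
      = (fun j : Nat => !pvLt (pvA A j) (pvA A (i - 1 + 1))) := by
    funext j
    have h1 : i - 1 + 1 = i := by omega
    simp only [PySem.List.pyGetD_natCast, pvA, pvLt, h1, ge_iff_le, ← decide_not]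
    exact decide_eq_decide.mpr (by omega)
  rw [hp]
  have h1 : i - 1 + 1 = i := by omega
  rw [h1]
  have hq := pvQ_step pvLt pvLt_facts.2.2.1 (pvA A) lo (i-1) (by omega)
  rw [h1] at hq
  rw [← hq, List.map_append]
  simp

theorem step_dec (A : List Int) (lo i : Nat) (hlo : lo ≤ i) (hi : 1 ≤ i) :
    popBack (fun j => decide (PySem.List.pyGetD A j 0 ≤ PySem.List.pyGetD A (i:Int) 0))
        ((pvQ pvGt (pvA A) lo (i-1)).map (fun (j : Nat) => (j:Int))) ++ [((i:Nat):Int)] =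
    (pvQ pvGt (pvA A) lo i).map (fun (j : Nat) => (j:Int)) := by
  rw [popBack_map]
  have hp : (fun j : Nat => decide (PySem.List.pyGetD A ((j : Nat) : Int) 0 ≤ PySem.List.pyGetD A (i:Int) 0))
      = (fun j : Nat => !pvGt (pvA A j) (pvA A (i - 1 + 1))) := by
    funext j
    have h1 : i - 1 + 1 = i := by omega
    simp only [PySem.List.pyGetD_natCast, pvA, pvGt, h1, ← decide_not]
    exact decide_eq_decide.mpr (by omega)
  rw [hp]
  have h1 : i - 1 + 1 = i := by omega
  rw [h1]
  have hq := pvQ_step pvGt pvGt_facts.2.2.1 (pvA A) lo (i-1) (by omega)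
  rw [h1] at hq
  rw [← hq, List.map_append]
  simp

-- the window trim on the Int-valued queue of the port
theorem trim_queue (c : Int → Int → Bool) (A : List Int) (b i : Nat) (hb : 1 ≤ b) (hbi : b ≤ i) :
    ((pvQ c (pvA A) (i-b) (i-1)).map (fun (j : Nat) => (j:Int))).dropWhile
        (fun j => decide (j ≤ (i:Int) - (b:Int))) =
    (pvQ c (pvA A) (i+1-b) (i-1)).map (fun (j : Nat) => (j:Int)) := by
  rw [List.dropWhile_map]
  have hp : ((fun j : Int => decide (j ≤ (i:Int) - (b:Int))) ∘ (fun j : Nat => (j:Int)))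
      = (fun j : Nat => decide (j < i + 1 - b)) := by
    funext j
    simp only [Function.comp]
    exact decide_eq_decide.mpr (by omega)
  rw [hp, pvQ_trim c (pvA A) (i-b) (i+1-b) (i-1) (by omega) (by omega)]

-- first loop: builds the queues for the window [0, i-1]
theorem loop1_inv (A : List Int) (i : Nat) (hi : 1 ≤ i) :
    (PySem.List.pyRange 0 (i:Int) 1).foldl (fun (qs : List Int × List Int) i =>
      let ai := PySem.List.pyGetD A i 0
      let inc := popBack (fun j => decide (PySem.List.pyGetD A j 0 ≥ ai)) qs.1
      let dec := popBack (fun j => decide (PySem.List.pyGetD A j 0 ≤ ai)) qs.2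
      (inc ++ [i], dec ++ [i])) ([], []) =
    ((pvQ pvLt (pvA A) 0 (i-1)).map (fun (j : Nat) => (j:Int)),
     (pvQ pvGt (pvA A) 0 (i-1)).map (fun (j : Nat) => (j:Int))) := by
  induction i with
  | zero => omega
  | succ i ih =>
    by_cases hi1 : 1 ≤ i
    · have hr : PySem.List.pyRange 0 ((i+1:Nat):Int) 1
          = PySem.List.pyRange 0 (i:Nat) 1 ++ [((i:Nat):Int)] := by
        push_cast
        exact PySem.List.pyRange_one_succ_right (by positivity)
      rw [hr, List.foldl_append, ih hi1]
      simp only [List.foldl_cons, List.foldl_nil]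
      have h1 : i + 1 - 1 = i := by omega
      rw [h1]
      exact Prod.ext (step_inc A 0 i (by omega) hi1) (step_dec A 0 i (by omega) hi1)
    · have h0 : i = 0 := by omega
      subst h0
      rw [show ((1:Nat):Int) = 0 + 1 by norm_num, PySem.List.pyRange_one_singleton]
      simp [popBack, pvQ, pvWin, pvKeep, pvA, List.range']

-- second loop: accumulates the per-window sums and slides the window
theorem loop2_inv (A : List Int) (b : Nat) (hb : 1 ≤ b) (i : Nat) (hbi : b ≤ i)
    (hin : i ≤ A.length) :
    (PySem.List.pyRange (b:Int) (i:Int) 1).foldl (fun (st : Int × List Int × List Int) i =>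
      let ai := PySem.List.pyGetD A i 0
      let r := PySem.Int.mod (PySem.Int.mod st.1 (10 ^ 9 + 7) + PySem.List.pyGetD A (st.2.1.headD 0) 0
                 + PySem.List.pyGetD A (st.2.2.headD 0) 0) (10 ^ 9 + 7)
      let inc0 := st.2.1.dropWhile (fun j => decide (j ≤ i - (b:Int)))
      let dec0 := st.2.2.dropWhile (fun j => decide (j ≤ i - (b:Int)))
      let inc := popBack (fun j => decide (PySem.List.pyGetD A j 0 ≥ ai)) inc0
      let dec := popBack (fun j => decide (PySem.List.pyGetD A j 0 ≤ ai)) dec0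
      (r, inc ++ [i], dec ++ [i]))
      (0, (pvQ pvLt (pvA A) 0 (b-1)).map (fun (j : Nat) => (j:Int)),
          (pvQ pvGt (pvA A) 0 (b-1)).map (fun (j : Nat) => (j:Int))) =
    (PySem.Int.mod (pvS A b (i-b)) (10 ^ 9 + 7),
     (pvQ pvLt (pvA A) (i-b) (i-1)).map (fun (j : Nat) => (j:Int)),
     (pvQ pvGt (pvA A) (i-b) (i-1)).map (fun (j : Nat) => (j:Int))) := by
  induction i with
  | zero => omega
  | succ i ih =>
    by_cases hbi1 : b ≤ i
    · have hr : PySem.List.pyRange (b:Int) ((i+1:Nat):Int) 1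
          = PySem.List.pyRange (b:Int) (i:Nat) 1 ++ [((i:Nat):Int)] := by
        push_cast
        exact PySem.List.pyRange_one_succ_right (by exact_mod_cast hbi1)
      rw [hr, List.foldl_append, ih hbi1 (by omega)]
      simp only [List.foldl_cons, List.foldl_nil]
      have hM : (0:Int) < 10 ^ 9 + 7 := by norm_num
      have hi1 : 1 ≤ i := by omega
      refine Prod.ext ?_ (Prod.ext ?_ ?_)
      · -- the result accumulator
        simp only [headD_map_cast, PySem.List.pyGetD_natCast,
          PySem.Int.mod_eq_emod_of_pos hM]
        show ((pvS A b (i-b)) % (10^9+7) % (10^9+7) + A.getD ((pvQ pvLt (pvA A) (i-b) (i-1)).headD 0) 0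
            + A.getD ((pvQ pvGt (pvA A) (i-b) (i-1)).headD 0) 0) % (10^9+7)
          = pvS A b (i+1-b) % (10^9+7)
        have hS : pvS A b (i+1-b) = pvS A b (i-b) + (pvMn A b (i-1) + pvMx A b (i-1)) := by
          unfold pvS
          have hm : i + 1 - b = (i - b) + 1 := by omega
          rw [hm, List.range'_concat, List.map_append, List.sum_append]
          simp only [List.map_cons, List.map_nil, List.sum_cons, List.sum_nil, one_mul]
          have he2 : b - 1 + (i - b) = i - 1 := by omega
          rw [he2]
          ring
        have harg : i - 1 + 1 - b = i - b := by omega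
        have hmn : pvMn A b (i-1) = pvA A ((pvQ pvLt (pvA A) (i-b) (i-1)).headD 0) := by
          unfold pvMn
          rw [harg]
        have hmx : pvMx A b (i-1) = pvA A ((pvQ pvGt (pvA A) (i-b) (i-1)).headD 0) := by
          unfold pvMx
          rw [harg]
        rw [hS, hmn, hmx]
        unfold pvA
        omega
      · rw [trim_queue pvLt A b i hb hbi1]
        have h1 : i + 1 - 1 = i := by omega
        rw [h1]
        exact step_inc A (i+1-b) i (by omega) hi1
      · rw [trim_queue pvGt A b i hb hbi1]
        have h1 : i + 1 - 1 = i := by omega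
        rw [h1]
        exact step_dec A (i+1-b) i (by omega) hi1
    · have h0 : i + 1 = b := by omega
      rw [h0, PySem.List.pyRange_one_eq_nil (le_refl _), List.foldl_nil]
      simp [pvS, PySem.Int.mod]

-- B's first loop: running min/max over the first window [0, b-1]
theorem prime_inv (A : List Int) (b : Nat) (hb : 1 ≤ b) :
    (PySem.List.pyRange 1 (b:Int) 1).foldl (fun (p : Int × Int) i =>
      let v := PySem.List.pyGetD A i 0
      (min p.1 v, max p.2 v)) (PySem.List.pyGetD A 0 0, PySem.List.pyGetD A 0 0) =
    (pvMn A b (b-1), pvMx A b (b-1)) := by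
  -- characterise the fold: a member of the window that bounds the whole window
  have main : ∀ m : Nat, 1 ≤ m →
      ∃ q : Int × Int, (PySem.List.pyRange 1 (m:Int) 1).foldl (fun (p : Int × Int) i =>
          let v := PySem.List.pyGetD A i 0
          (min p.1 v, max p.2 v)) (PySem.List.pyGetD A 0 0, PySem.List.pyGetD A 0 0) = q
        ∧ q.1 ∈ (pvWin 0 (m-1)).map (pvA A) ∧ (∀ k ∈ pvWin 0 (m-1), q.1 ≤ pvA A k)
        ∧ q.2 ∈ (pvWin 0 (m-1)).map (pvA A) ∧ (∀ k ∈ pvWin 0 (m-1), pvA A k ≤ q.2) := by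
    intro m hm
    induction m with
    | zero => omega
    | succ m ihm =>
      by_cases hm1 : 1 ≤ m
      · obtain ⟨q, hq, hq1, hq2, hq3, hq4⟩ := ihm hm1
        have hr : PySem.List.pyRange 1 ((m+1:Nat):Int) 1
            = PySem.List.pyRange 1 (m:Nat) 1 ++ [((m:Nat):Int)] := by
          push_cast
          exact PySem.List.pyRange_one_succ_right (by omega)
        rw [hr, List.foldl_append, hq]
        simp only [List.foldl_cons, List.foldl_nil]
        have hwin : pvWin 0 (m+1-1) = pvWin 0 (m-1) ++ [m] := by
          unfold pvWin
          have h1 : m + 1 - 1 + 1 - 0 = (m - 1 + 1 - 0) + 1 := by omega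
          rw [h1, List.range'_concat]
          congr 2
          omega
        have hvm : PySem.List.pyGetD A ((m:Nat):Int) 0 = pvA A m := by
          simp [PySem.List.pyGetD_natCast, pvA]
        refine ⟨_, rfl, ?_, ?_, ?_, ?_⟩
        · rw [hwin, List.map_append, hvm]
          rcases le_or_gt q.1 (pvA A m) with h | h
          · rw [min_eq_left h]
            exact List.mem_append_left _ hq1
          · rw [min_eq_right (le_of_lt h)]
            exact List.mem_append_right _ (by simp)
        · intro k hk
          rw [hwin] at hk
          rw [hvm]
          rcases List.mem_append.mp hk with hk | hk
          · exact le_trans (min_le_left _ _) (hq2 k hk)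
          · have : k = m := by simpa using hk
            subst this
            exact min_le_right _ _
        · rw [hwin, List.map_append, hvm]
          rcases le_or_gt (pvA A m) q.2 with h | h
          · rw [max_eq_left h]
            exact List.mem_append_left _ hq3
          · rw [max_eq_right (le_of_lt h)]
            exact List.mem_append_right _ (by simp)
        · intro k hk
          rw [hwin] at hk
          rw [hvm]
          rcases List.mem_append.mp hk with hk | hk
          · exact le_trans (hq4 k hk) (le_max_left _ _)
          · have : k = m := by simpa using hk
            subst this
            exact le_max_right _ _
      · have h0 : m = 0 := by omega
        subst h0
        rw [show ((1:Nat):Int) = 1 by norm_num, PySem.List.pyRange_one_eq_nil (le_refl _),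
          List.foldl_nil]
        have hw0 : pvWin 0 0 = [0] := by simp [pvWin, List.range'_one]
        have h00 : PySem.List.pyGetD A 0 0 = pvA A 0 := by
          simp [PySem.List.pyGetD_zero, pvA]
        refine ⟨_, rfl, ?_, ?_, ?_, ?_⟩ <;> rw [hw0] <;> simp [h00]
  obtain ⟨q, hq, hq1, hq2, hq3, hq4⟩ := main b hb
  rw [hq]
  have hlo : (0:Nat) ≤ b - 1 := by omega
  -- min component
  have hhmn := pvQ_head_mem pvLt (pvA A) (lo := 0) (i := b-1) hlo
  have hminle := pvQ_head_min pvLt pvLt_facts.1 pvLt_facts.2.1 pvLt_facts.2.2.1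
    pvLt_facts.2.2.2 (pvA A) (lo := 0) (i := b-1) hlo
  have hhmx := pvQ_head_mem pvGt (pvA A) (lo := 0) (i := b-1) hlo
  have hmaxge := pvQ_head_min pvGt pvGt_facts.1 pvGt_facts.2.1 pvGt_facts.2.2.1
    pvGt_facts.2.2.2 (pvA A) (lo := 0) (i := b-1) hlo
  have e1 : q.1 = pvMn A b (b-1) := by
    unfold pvMn
    have hbb : b - 1 + 1 - b = 0 := by omega
    rw [hbb]
    rcases List.mem_map.mp hq1 with ⟨k, hk, hkv⟩
    have h1 : q.1 ≤ pvA A ((pvQ pvLt (pvA A) 0 (b-1)).headD 0) :=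
      hq2 _ (List.mem_of_mem_filter hhmn)
    have h2 : ¬ pvA A k < pvA A ((pvQ pvLt (pvA A) 0 (b-1)).headD 0) := by
      have := hminle k hk
      simpa [pvLt] using this
    omega
  have e2 : q.2 = pvMx A b (b-1) := by
    unfold pvMx
    have hbb : b - 1 + 1 - b = 0 := by omega
    rw [hbb]
    rcases List.mem_map.mp hq3 with ⟨k, hk, hkv⟩
    have h1 : pvA A ((pvQ pvGt (pvA A) 0 (b-1)).headD 0) ≤ q.2 :=
      hq4 _ (List.mem_of_mem_filter hhmx)
    have h2 : ¬ pvA A ((pvQ pvGt (pvA A) 0 (b-1)).headD 0) < pvA A k := by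
      have := hmaxge k hk
      simpa [pvGt] using this
    omega
  exact Prod.ext e1 e2

-- B's second loop: plain accumulation of the later windows' extrema
theorem alt_inv (A : List Int) (b : Nat) (hb : 1 ≤ b) (i : Nat) (hbi : b ≤ i)
    (hin : i ≤ A.length) :
    (PySem.List.pyRange (b:Int) (i:Int) 1).foldl (fun t e =>
      let w := PySem.List.slice A (some (e - (b:Int) + 1)) (some (e + 1))
      t + ((PySem.List.min? w (fun x => x)).getD 0 + (PySem.List.max? w (fun x => x)).getD 0))
      (pvMn A b (b-1) + pvMx A b (b-1)) =
    pvS A b (i - (b-1)) := by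
  induction i with
  | zero => omega
  | succ i ih =>
    by_cases hbi1 : b ≤ i
    · have hr : PySem.List.pyRange (b:Int) ((i+1:Nat):Int) 1
          = PySem.List.pyRange (b:Int) (i:Nat) 1 ++ [((i:Nat):Int)] := by
        push_cast
        exact PySem.List.pyRange_one_succ_right (by omega)
      rw [hr, List.foldl_append, ih hbi1 (by omega)]
      simp only [List.foldl_cons, List.foldl_nil]
      have hsl : PySem.List.slice A (some ((i:Int) - (b:Int) + 1)) (some ((i:Int) + 1))
          = (A.drop (i+1-b)).take (i + 1 - (i+1-b)) := by
        have e1 : (i:Int) - (b:Int) + 1 = ((i+1-b : Nat) : Int) := by omega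
        have e2 : (i:Int) + 1 = ((i+1 : Nat) : Int) := by omega
        rw [e1, e2, PySem.List.slice_natCast]
      rw [hsl]
      have hmn := min_match A (i+1-b) i (by omega) (by omega)
      have hmx := max_match A (i+1-b) i (by omega) (by omega)
      rw [hmn, hmx]
      have hS : pvS A b (i + 1 - (b-1)) = pvS A b (i - (b-1)) + (pvMn A b i + pvMx A b i) := by
        unfold pvS
        have hm : i + 1 - (b-1) = (i - (b-1)) + 1 := by omega
        rw [hm, List.range'_concat, List.map_append, List.sum_append]
        simp only [List.map_cons, List.map_nil, List.sum_cons, List.sum_nil, one_mul]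
        have he2 : b - 1 + (i - (b-1)) = i := by omega
        rw [he2]
        ring
      rw [hS]
      unfold pvMn pvMx pvA
      ring
    · have h0 : i + 1 = b := by omega
      rw [h0, PySem.List.pyRange_one_eq_nil (le_refl _), List.foldl_nil]
      have h1 : b - (b-1) = 1 := by omega
      rw [h1]
      simp [pvS, List.range'_one]

theorem solve_eq (A : List Int) (B : Int) (h1 : 1 ≤ B) (h2 : B ≤ (A.length : Int)) :
    solve A B = solve_alt A B := by
  lift B to Nat using (by omega) with b
  have hb : 1 ≤ b := by exact_mod_cast h1
  have hbn : b ≤ A.length := by exact_mod_cast h2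
  unfold solve solve_alt
  simp only []
  rw [loop1_inv A b hb, loop2_inv A b hb A.length hbn (le_refl _), prime_inv A b hb,
    alt_inv A b hb A.length hbn (le_refl _)]
  simp only [headD_map_cast, PySem.List.pyGetD_natCast]
  have hM : (0:Int) < 10 ^ 9 + 7 := by norm_num
  simp only [PySem.Int.mod_eq_emod_of_pos hM]
  set n := A.length with hn
  have hS : pvS A b (n - (b-1)) = pvS A b (n-b) + (pvMn A b (n-1) + pvMx A b (n-1)) := by
    unfold pvS
    have hm : n - (b-1) = (n - b) + 1 := by omega
    rw [hm, List.range'_concat, List.map_append, List.sum_append]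
    simp only [List.map_cons, List.map_nil, List.sum_cons, List.sum_nil, one_mul]
    have he2 : b - 1 + (n - b) = n - 1 := by omega
    rw [he2]
    ring
  have harg : n - 1 + 1 - b = n - b := by omega
  have hmn : pvMn A b (n-1) = pvA A ((pvQ pvLt (pvA A) (n-b) (n-1)).headD 0) := by
    unfold pvMn
    rw [harg]
  have hmx : pvMx A b (n-1) = pvA A ((pvQ pvGt (pvA A) (n-b) (n-1)).headD 0) := by
    unfold pvMx
    rw [harg]
  rw [hS, hmn, hmx]
  unfold pvA
  omega

-- ===== VERDICT (by name: the statement is the Claim_ definition above) =====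
theorem solve_spec : Claim_equal_solve := by
  intro A B _ hpre
  unfold Spec_solve
  exact solve_eq A B hpre.1 hpre.2
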